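-- pv_equiv track=rewrite | github.com/YogeshKumar805/POTD-Geeks-For-Geeks | Rotate and delete.py | rotateDelete
-- ===== SOURCE A (Python) =====
-- def rotateDelete(arr):
--     # code here
--     ind=0
--     ind_2=0
--     ind_3=len(arr)-1
--     while(len(arr)!=1):
--         x = arr[len(arr)-1]
--         arr.insert(0,x)
--         arr.pop(len(arr)-1)
--         y = ind_3-ind-ind_2
--         y = 0 if y<0 else y
--         arr.pop(y)
--         ind+=1
--         ind_2+=1
--     return arr[0]
-- ===== SOURCE B (Python) =====
-- def rotateDelete(arr):
--     # Track the survivor's index backwards instead of mutating the list: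
--     # at the moment the list has length m, the eventual survivor sits at
--     # index pos; one reverse step of "rotate right then delete index
--     # max(0, 2*m-n-1)" transports that index.  O(n) time, no list mutation.
--     n = len(arr)
--     pos = 0
--     for m in range(2, n + 1):
--         y = 2 * m - n - 1
--         if y < 0:
--             y = 0
--         if pos >= y:
--             pos += 1
--         pos = m - 1 if pos == 0 else pos - 1
--     return arr[pos]
-- ===== Notes on version B (the rewrite author's own statement) =====
-- stated objective: faster
-- what changed: Instead of simulating the rotate-and-delete process on a mutable list (each insert/pop is O(n)), B only tracks the index of the eventual survivor, transporting it backwards through one deletion step per loop iteration, and indexes the untouched input once at the end (A also mutates arr in place; B does not).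
-- outside the precondition, e.g. on rotateDelete([]): A raises IndexError, B raises IndexError
import Mathlib
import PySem

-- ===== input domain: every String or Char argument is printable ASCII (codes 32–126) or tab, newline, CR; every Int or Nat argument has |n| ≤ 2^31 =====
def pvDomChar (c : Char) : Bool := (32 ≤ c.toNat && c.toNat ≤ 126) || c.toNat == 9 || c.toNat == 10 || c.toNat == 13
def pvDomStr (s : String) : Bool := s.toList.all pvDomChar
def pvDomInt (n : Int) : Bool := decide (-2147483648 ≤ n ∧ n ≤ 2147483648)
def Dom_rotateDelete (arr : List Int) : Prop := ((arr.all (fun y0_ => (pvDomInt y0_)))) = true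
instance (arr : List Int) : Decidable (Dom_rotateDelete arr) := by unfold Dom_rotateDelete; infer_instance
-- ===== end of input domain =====

-- B replaces A's O(n^2) list-mutation simulation by an O(n) backward transport of the
-- survivor's index (A mutates arr in place; the equivalence proved here is about the return value).


-- ===== PORT A =====
-- while-loop of A: state (arr, ind, ind_2); ind_3 is loop-invariant.  The 'none' arms
-- (IndexError) are unreachable on Pre_ (arr ≠ []).
def rotateDeleteLoop (arr : List Int) (ind ind2 ind3 : Int) : Int :=
  if arr.length ≠ 1 then
    match h1 : PySem.List.pyGet? arr ((arr.length : Int) - 1) with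
    | none => 0
    | some x =>
      match h2 : PySem.List.pop? (PySem.List.insert arr 0 x)
          (((PySem.List.insert arr 0 x).length : Int) - 1) with
      | none => 0
      | some p1 =>
        match h3 : PySem.List.pop? p1.2
            (if ind3 - ind - ind2 < 0 then 0 else ind3 - ind - ind2) with
        | none => 0
        | some p2 => rotateDeleteLoop p2.2 (ind + 1) (ind2 + 1) ind3
  else
    PySem.List.pyGetD arr 0 0
termination_by arr.length
decreasing_by
  have e3 := PySem.List.length_of_pop?_eq_some _ h3
  have e2 := PySem.List.length_of_pop?_eq_some _ h2
  have e1 : (PySem.List.insert arr 0 x).length = arr.length + 1 :=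
    PySem.List.length_insert arr 0 x
  have hx := PySem.List.mem_of_pyGet?_eq_some arr h1
  have hne : arr ≠ [] := by intro h; rw [h] at hx; exact (List.not_mem_nil hx)
  have : 1 ≤ arr.length := List.length_pos_iff.mpr hne
  omega

def rotateDelete (arr : List Int) : Int :=
  rotateDeleteLoop arr 0 0 ((arr.length : Int) - 1)

-- ===== PORT B =====
-- body of B's for-loop (one reverse transport step of the survivor index)
def rdStep (n pos m : Int) : Int :=
  let y := 2 * m - n - 1
  let y := if y < 0 then 0 else y
  let pos := if pos ≥ y then pos + 1 else pos
  if pos = 0 then m - 1 else pos - 1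

def rotateDelete_alt (arr : List Int) : Int :=
  let n : Int := arr.length
  let pos : Int := (PySem.List.pyRange 2 (n + 1) 1).foldl (rdStep n) 0
  PySem.List.pyGetD arr pos 0

-- ===== PRECONDITION & SPEC =====
-- A (arr[-1] on the empty list) and B (arr[pos]) both raise IndexError on []: excluded.
def Pre_rotateDelete (arr : List Int) : Prop := arr ≠ []
instance (arr : List Int) : Decidable (Pre_rotateDelete arr) := by
  unfold Pre_rotateDelete; infer_instance
def pvWitness_rotateDelete : List Int := [3, 1, 2]

def Spec_rotateDelete (arr : List Int) (out : Int) : Prop := out = rotateDelete_alt arr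
instance (arr : List Int) (out : Int) : Decidable (Spec_rotateDelete arr out) := by
  unfold Spec_rotateDelete; infer_instance

-- ===== CLAIM (what is proved, stated in full; the proofs are below) =====
def Claim_equal_rotateDelete : Prop :=
  ∀ (arr : List Int), Dom_rotateDelete arr → Pre_rotateDelete arr →
    Spec_rotateDelete arr (rotateDelete arr)

-- ===== LEMMAS AND PROOFS =====

-- survivor-index recurrence, in Nat: G n m = the index, in the current list of length m,
-- of the element that survives A's process started on a list of length n.
def stepG (n m g : Nat) : Nat :=
  if 2 * m - (n + 1) ≤ g then g else if g = 0 then m - 1 else g - 1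

def G (n : Nat) : Nat → Nat
  | 0 => 0
  | 1 => 0
  | (m + 2) => stepG n (m + 2) (G n (m + 1))

lemma G_lt (n : Nat) : ∀ m, 1 ≤ m → G n m < m := by
  intro m
  induction m with
  | zero => omega
  | succ m ih =>
    intro _
    match m, ih with
    | 0, _ => simp [G]
    | (k + 1), ih =>
      have hk := ih (by omega)
      show stepG n (k + 2) (G n (k + 1)) < k + 2
      unfold stepG
      split_ifs <;> omega

lemma rdStep_eq (n pos m : Int) :
    rdStep n pos m =
      if (if pos ≥ (if 2 * m - n - 1 < 0 then 0 else 2 * m - n - 1) then pos + 1 else pos) = 0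
      then m - 1
      else (if pos ≥ (if 2 * m - n - 1 < 0 then 0 else 2 * m - n - 1) then pos + 1 else pos) - 1 := rfl

-- bridge: B's Int fold over range(2, m+1) computes G n m.
lemma fold_eq_G (n : Nat) : ∀ m : Nat, 1 ≤ m →
    (PySem.List.pyRange 2 ((m : Int) + 1) 1).foldl (rdStep n) 0 = (G n m : Int) := by
  intro m
  induction m with
  | zero => omega
  | succ m ih =>
    intro _
    by_cases hm : m = 0
    · subst hm
      have h2 : ((0 + 1 : Nat) : Int) + 1 = 2 := by norm_num
      rw [h2, PySem.List.pyRange_one_eq_nil (le_refl 2)]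
      simp [G]
    · have ihm := ih (by omega)
      have hc : ((m + 1 : Nat) : Int) + 1 = ((m : Int) + 1) + 1 := by push_cast; ring
      rw [hc, PySem.List.pyRange_one_succ_right (by omega), List.foldl_append, ihm]
      simp only [List.foldl_cons, List.foldl_nil]
      rw [rdStep_eq]
      obtain ⟨k, hk⟩ : ∃ k, m = k + 1 := ⟨m - 1, by omega⟩
      subst hk
      have hg : G n (k + 1) < k + 1 := G_lt n (k + 1) (by omega)
      have hG2 : G n (k + 2) = stepG n (k + 2) (G n (k + 1)) := rfl
      rw [hG2]
      simp only [stepG]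
      split_ifs <;> push_cast <;> omega

-- index transport through one rotate-and-delete step:
-- a (length m ≥ 2)  ↦  ((x :: a).eraseIdx m).eraseIdx y,  survivor index g ↦ stepG-image.
lemma transport (a : List Int) (m : Nat) (ha : a.length = m) (hm : 2 ≤ m)
    (x : Int) (hx : x = a.getD (m - 1) 0) (y g : Nat) (hy : y ≤ m - 1) (hg : g < m - 1) :
    (((x :: a).eraseIdx m).eraseIdx y).getD g 0
      = a.getD (if y ≤ g then g else if g = 0 then m - 1 else g - 1) 0 := by
  obtain ⟨k, hk⟩ : ∃ k, m = k + 1 := ⟨m - 1, by omega⟩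
  subst hk
  have hEr : (x :: a).eraseIdx (k + 1) = x :: a.eraseIdx k := by
    simp [List.eraseIdx_cons_succ]
  rw [hEr]
  set R := x :: a.eraseIdx k with hR
  have hlenE : (a.eraseIdx k).length = k := by
    rw [List.length_eraseIdx_of_lt (by omega)]; omega
  have hlenR : R.length = k + 1 := by simp [hR, hlenE]
  have hRj : ∀ j : Nat, j ≤ k → R.getD j 0 = if j = 0 then x else a.getD (j - 1) 0 := by
    intro j hj
    match j with
    | 0 => simp [hR]
    | (j + 1) =>
      simp only [hR, List.getD_cons_succ, if_neg (Nat.succ_ne_zero j)]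
      have hjk : j < k := by omega
      rw [List.getD_eq_getElem _ _ (by omega : j < (a.eraseIdx k).length),
          List.getElem_eraseIdx, dif_pos hjk, Nat.add_sub_cancel,
          List.getD_eq_getElem _ _ (by omega : j < a.length)]
  have hget : (R.eraseIdx y).getD g 0 = R.getD (if y ≤ g then g + 1 else g) 0 := by
    have hyR : y < R.length := by omega
    have hgE : g < (R.eraseIdx y).length := by
      rw [List.length_eraseIdx_of_lt hyR]; omega
    rw [List.getD_eq_getElem _ _ hgE, List.getElem_eraseIdx]
    split_ifs with h1 h2 h3
    · exact absurd h2 (by omega)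
    · rw [List.getD_eq_getElem _ _ (by omega : g < R.length)]
    · rw [List.getD_eq_getElem _ _ (by omega : g + 1 < R.length)]
    · exact absurd (by omega : y ≤ g) h3
  rw [hget]
  by_cases hcase : y ≤ g
  · rw [if_pos hcase, if_pos hcase, hRj (g + 1) (by omega),
        if_neg (Nat.succ_ne_zero g)]
    simp
  · rw [if_neg hcase, if_neg hcase, hRj g (by omega)]
    split_ifs with h0
    · subst h0; simpa using hx
    · rfl

-- main loop lemma: with ind = ind2 = n - m and ind3 = n - 1, the loop on a list of
-- length m returns the element at index G n m of the current list.
lemma loop_eq (n : Nat) : ∀ m (a : List Int), a.length = m → 1 ≤ m → m ≤ n →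
    rotateDeleteLoop a ((n : Int) - m) ((n : Int) - m) ((n : Int) - 1)
      = a.getD (G n m) 0 := by
  intro m
  induction m with
  | zero => omega
  | succ m ih =>
    intro a ha _ hmn
    by_cases hm : m = 0
    · subst hm
      rw [rotateDeleteLoop.eq_def, if_neg (show ¬ a.length ≠ 1 by omega)]
      simp [G, PySem.List.pyGetD_zero]
    · -- length ≥ 2: unfold one loop iteration
      have hlen2 : 2 ≤ a.length := by omega
      have hget1 : PySem.List.pyGet? a ((a.length : Int) - 1)
          = some (a.getD (a.length - 1) 0) := by
        rw [PySem.List.pyGet?_eq_some_getElem _ (by omega) (by omega)]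
        rw [List.getD_eq_getElem _ _ (by omega)]
        congr 2
        omega
      set x := a.getD (a.length - 1) 0 with hxdef
      have hins : PySem.List.insert a 0 x = x :: a := by
        simp [PySem.List.insert, PySem.List.sliceIndices]
      have hpop1 : PySem.List.pop? (PySem.List.insert a 0 x)
          (((PySem.List.insert a 0 x).length : Int) - 1)
          = some ((x :: a)[a.length], (x :: a).eraseIdx a.length) := by
        rw [hins]
        have hc : ((x :: a).length : Int) - 1 = ((a.length : Nat) : Int) := by simp
        rw [hc, PySem.List.pop?_natCast _ _ (by simp)]
      set ynat : Nat := 2 * (m + 1) - (n + 1) with hydef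
      have hy2 : (if ((n : Int) - 1) - ((n : Int) - (↑(m + 1) : Int)) - ((n : Int) - (↑(m + 1) : Int)) < 0 then 0
          else ((n : Int) - 1) - ((n : Int) - (↑(m + 1) : Int)) - ((n : Int) - (↑(m + 1) : Int)))
          = ((ynat : Nat) : Int) := by
        rw [hydef]
        split_ifs <;> push_cast <;> omega
      have hlenE : ((x :: a).eraseIdx a.length).length = a.length := by
        rw [List.length_eraseIdx_of_lt (by simp)]; simp
      have hpop2 : PySem.List.pop? ((x :: a).eraseIdx a.length) ((ynat : Nat) : Int)
          = some ((((x :: a).eraseIdx a.length))[ynat]'(by omega),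
                  ((x :: a).eraseIdx a.length).eraseIdx ynat) :=
        PySem.List.pop?_natCast _ _ (by omega)
      rw [rotateDeleteLoop.eq_def, if_pos (show a.length ≠ 1 by omega)]
      split
      next h1 =>
        rw [hget1] at h1; cases h1
      next x' h1 =>
        rw [hget1] at h1
        have hx' : x' = x := by injection h1 with h; exact h.symm
        subst hx'
        split
        next h2 =>
          rw [hpop1] at h2; cases h2
        next p1 h2 =>
          rw [hpop1] at h2
          have hp1 : p1 = ((x :: a)[a.length], (x :: a).eraseIdx a.length) := by
            injection h2 with h; exact h.symm
          subst hp1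
          split
          next h3 =>
            simp only [] at h3
            rw [hy2, hpop2] at h3; cases h3
          next p2 h3 =>
            simp only [] at h3
            rw [hy2, hpop2] at h3
            have hp2 : p2 = ((((x :: a).eraseIdx a.length))[ynat]'(by omega),
                ((x :: a).eraseIdx a.length).eraseIdx ynat) := by
              injection h3 with h; exact h.symm
            subst hp2
            simp only []
            have harg : (n : Int) - (↑(m + 1) : Int) + 1 = (n : Int) - (↑m : Int) := by
              push_cast; ring
            rw [harg]
            have hlen3 : (((x :: a).eraseIdx a.length).eraseIdx ynat).length = m := by
              rw [List.length_eraseIdx_of_lt (by omega), hlenE]; omega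
            rw [ih _ hlen3 (by omega) (by omega)]
            have ht := transport a (m + 1) ha (by omega) x (by rw [hxdef, ha]) ynat (G n m)
              (by omega) (by simpa using G_lt n m (by omega))
            rw [ha, ht]
            congr 1
            obtain ⟨k, hk⟩ : ∃ k, m = k + 1 := ⟨m - 1, by omega⟩
            subst hk
            have hG2 : G n (k + 2) = stepG n (k + 2) (G n (k + 1)) := rfl
            rw [hG2]
            simp only [stepG]
            rw [hydef]

-- ===== VERDICT (by name: the statement is the Claim_ definition above) =====
theorem rotateDelete_spec : Claim_equal_rotateDelete := by
  intro arr _ hpre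
  unfold Spec_rotateDelete
  have hn : 1 ≤ arr.length := List.length_pos_iff.mpr hpre
  have hA : rotateDelete arr = arr.getD (G arr.length arr.length) 0 := by
    have h := loop_eq arr.length arr.length arr rfl hn le_rfl
    rw [show ((arr.length : Int) - (arr.length : Int)) = 0 by ring] at h
    exact h
  have hB : rotateDelete_alt arr
      = PySem.List.pyGetD arr
          ((PySem.List.pyRange 2 ((arr.length : Int) + 1) 1).foldl (rdStep (arr.length : Int)) 0) 0 := rfl
  rw [hA, hB, fold_eq_G arr.length arr.length hn, PySem.List.pyGetD_natCast]
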